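-- pv_equiv track=rewrite | github.com/Egor213/Only-oop | main.py | win_stat
-- ===== SOURCE A (Python) =====
-- def win_stat(mass):
--     win_a = 0
--     win_b = 0
--     money_a = 0
--     money_b = 0
--     money_a_mass = []
--     money_b_mass = []
--     for i in mass:
--         if i == (0, 0) or i == (1,1):
--             win_a += 1
--             money_a += 2
--             money_a_mass.append(2)
--             money_b_mass.append(-2)
--             money_b -= 2
--
--         else:
--             if i == (0, 1):
--                 money_b += 3
--                 money_a -= 3
--                 money_a_mass.append(-3)
--                 money_b_mass.append(3)
--             else:
--                 money_b += 1
--                 money_a -= 1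
--                 money_a_mass.append(-1)
--                 money_b_mass.append(1)
--             win_b += 1
--     return [win_a, win_b], [money_a, money_b], money_a_mass, money_b_mass
-- ===== SOURCE B (Python) =====
-- def win_stat(mass):
--     n = len(mass)
--     win_a = mass.count((0, 0)) + mass.count((1, 1))
--     c01 = mass.count((0, 1))
--     money_a = 3 * win_a - 2 * c01 - n
--     money_a_mass = [2 if x == (0, 0) or x == (1, 1) else (-3 if x == (0, 1) else -1)
--                     for x in mass]
--     return ([win_a, n - win_a], [money_a, -money_a],
--             money_a_mass, [-v for v in money_a_mass])
-- ===== Notes on version B (the rewrite author's own statement) =====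
-- stated objective: alternative
-- what changed: B computes win_a and money_a directly from mass.count of the three outcome pairs via the closed-form identity money_a = 3*win_a - 2*c01 - n (no accumulation), derives win_b/money_b by subtraction/negation, and builds the payoff lists by a separate map pass.
import Mathlib
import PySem

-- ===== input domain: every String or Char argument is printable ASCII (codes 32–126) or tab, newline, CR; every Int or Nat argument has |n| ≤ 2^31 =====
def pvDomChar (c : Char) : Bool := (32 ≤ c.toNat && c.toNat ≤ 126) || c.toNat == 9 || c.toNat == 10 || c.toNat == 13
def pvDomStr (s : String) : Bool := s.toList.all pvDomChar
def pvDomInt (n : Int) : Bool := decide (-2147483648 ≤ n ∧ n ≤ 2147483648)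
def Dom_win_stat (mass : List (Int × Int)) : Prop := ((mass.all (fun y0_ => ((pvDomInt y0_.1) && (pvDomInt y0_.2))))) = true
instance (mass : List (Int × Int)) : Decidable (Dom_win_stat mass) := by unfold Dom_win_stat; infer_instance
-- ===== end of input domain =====

-- B replaces A's six-accumulator loop by counting the three outcome pairs and a
-- closed-form formula for the money totals, plus a separate map pass for the lists.

-- ===== PORT A =====
-- A's loop over mass with six accumulators, branches in the same order as the Python.
def win_stat (mass : List (Int × Int)) : List Int × List Int × List Int × List Int :=
  let st := mass.foldl
    (fun (st : Int × Int × Int × Int × List Int × List Int) i =>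
      let (win_a, win_b, money_a, money_b, maa, mbb) := st
      if i = ((0 : Int), (0 : Int)) ∨ i = ((1 : Int), (1 : Int)) then
        (win_a + 1, win_b, money_a + 2, money_b - 2, maa ++ [(2 : Int)], mbb ++ [(-2 : Int)])
      else
        if i = ((0 : Int), (1 : Int)) then
          (win_a, win_b + 1, money_a - 3, money_b + 3, maa ++ [(-3 : Int)], mbb ++ [(3 : Int)])
        else
          (win_a, win_b + 1, money_a - 1, money_b + 1, maa ++ [(-1 : Int)], mbb ++ [(1 : Int)]))
    (0, 0, 0, 0, [], [])
  ([st.1, st.2.1], [st.2.2.1, st.2.2.2.1], st.2.2.2.2.1, st.2.2.2.2.2)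

-- ===== PORT B =====
def win_stat_alt (mass : List (Int × Int)) : List Int × List Int × List Int × List Int :=
  let n : Int := mass.length
  let win_a : Int := PySem.List.count mass ((0 : Int), (0 : Int)) + PySem.List.count mass ((1 : Int), (1 : Int))
  let c01 : Int := PySem.List.count mass ((0 : Int), (1 : Int))
  let money_a := 3 * win_a - 2 * c01 - n
  let money_a_mass := mass.map (fun x =>
    if x = ((0 : Int), (0 : Int)) ∨ x = ((1 : Int), (1 : Int)) then (2 : Int)
    else if x = ((0 : Int), (1 : Int)) then -3 else -1)
  ([win_a, n - win_a], [money_a, -money_a], money_a_mass, money_a_mass.map (fun v => -v))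

-- ===== PRECONDITION & SPEC =====
def Spec_win_stat (mass : List (Int × Int)) (out : List Int × List Int × List Int × List Int) : Prop := out = win_stat_alt mass
instance (mass : List (Int × Int)) (out : List Int × List Int × List Int × List Int) : Decidable (Spec_win_stat mass out) := by unfold Spec_win_stat; infer_instance

-- ===== CLAIM =====
def Claim_equal_win_stat : Prop := ∀ (mass : List (Int × Int)), Dom_win_stat mass → Spec_win_stat mass (win_stat mass)

-- ===== LEMMAS AND PROOFS =====

-- B's per-game payoff
def pvPay (x : Int × Int) : Int :=
  if x = ((0 : Int), (0 : Int)) ∨ x = ((1 : Int), (1 : Int)) then (2 : Int)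
  else if x = ((0 : Int), (1 : Int)) then -3 else -1

-- invariant of A's fold, expressed through B's counts and payoff map
lemma win_stat_fold (mass : List (Int × Int))
    (wa wb ma mb : Int) (la lb : List Int) :
    mass.foldl
      (fun (st : Int × Int × Int × Int × List Int × List Int) i =>
        let (win_a, win_b, money_a, money_b, maa, mbb) := st
        if i = ((0 : Int), (0 : Int)) ∨ i = ((1 : Int), (1 : Int)) then
          (win_a + 1, win_b, money_a + 2, money_b - 2, maa ++ [(2 : Int)], mbb ++ [(-2 : Int)])
        else
          if i = ((0 : Int), (1 : Int)) then
            (win_a, win_b + 1, money_a - 3, money_b + 3, maa ++ [(-3 : Int)], mbb ++ [(3 : Int)])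
          else
            (win_a, win_b + 1, money_a - 1, money_b + 1, maa ++ [(-1 : Int)], mbb ++ [(1 : Int)]))
      (wa, wb, ma, mb, la, lb)
    = (wa + (PySem.List.count mass ((0 : Int), (0 : Int)) + PySem.List.count mass ((1 : Int), (1 : Int))),
       wb + ((mass.length : Int) - (PySem.List.count mass ((0 : Int), (0 : Int)) + PySem.List.count mass ((1 : Int), (1 : Int)))),
       ma + (3 * (PySem.List.count mass ((0 : Int), (0 : Int)) + PySem.List.count mass ((1 : Int), (1 : Int)))
              - 2 * PySem.List.count mass ((0 : Int), (1 : Int)) - (mass.length : Int)),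
       mb - (3 * (PySem.List.count mass ((0 : Int), (0 : Int)) + PySem.List.count mass ((1 : Int), (1 : Int)))
              - 2 * PySem.List.count mass ((0 : Int), (1 : Int)) - (mass.length : Int)),
       la ++ mass.map pvPay,
       lb ++ (mass.map pvPay).map (fun v => -v)) := by
  induction mass generalizing wa wb ma mb la lb with
  | nil => simp [PySem.List.count]
  | cons i t ih =>
    simp only [List.foldl_cons, List.map_cons, List.length_cons]
    by_cases h : i = ((0 : Int), (0 : Int)) ∨ i = ((1 : Int), (1 : Int))
    · rw [if_pos h, ih]
      have hp : pvPay i = 2 := by simp [pvPay, h]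
      rcases h with h | h <;>
      · subst h
        simp only [hp, PySem.List.count, List.count_cons, Prod.mk.injEq, List.cons_append,
          List.append_assoc, List.singleton_append, List.map_cons]
        refine ⟨?_, ?_, ?_, ?_, by simp, by simp⟩ <;> (simp <;> push_cast <;> ring)
    · rw [if_neg h]
      have hne00 : i ≠ ((0 : Int), (0 : Int)) := fun hh => h (Or.inl hh)
      have hne11 : i ≠ ((1 : Int), (1 : Int)) := fun hh => h (Or.inr hh)
      by_cases h2 : i = ((0 : Int), (1 : Int))
      · rw [if_pos h2, ih]
        have hp : pvPay i = -3 := by simp [pvPay, h, h2]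
        subst h2
        simp only [hp, PySem.List.count, List.count_cons, Prod.mk.injEq, List.cons_append,
          List.append_assoc, List.singleton_append, List.map_cons]
        refine ⟨?_, ?_, ?_, ?_, by simp, by simp⟩ <;> (simp [hne00, hne11] <;> push_cast <;> ring)
      · rw [if_neg h2, ih]
        have hp : pvPay i = -1 := by simp [pvPay, h, h2]
        simp only [hp, PySem.List.count, List.count_cons, Prod.mk.injEq, List.cons_append,
          List.append_assoc, List.singleton_append, List.map_cons]
        refine ⟨?_, ?_, ?_, ?_, by simp, by simp⟩ <;>
          (simp [hne00, hne11, h2] <;> push_cast <;> ring)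

-- ===== VERDICT =====
theorem win_stat_spec : Claim_equal_win_stat := by
  intro mass _
  show win_stat mass = win_stat_alt mass
  unfold win_stat win_stat_alt
  rw [win_stat_fold]
  simp only [zero_add, List.nil_append, Int.sub_eq_add_neg]
  rfl
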